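-- pv_equiv track=rewrite | github.com/matyaslagos/analogical-path-model | ecgpack/sp.py | bars
-- ===== SOURCE A (Python) =====
-- def bars(coords, ones_out):
--     bar_tup = ()
--     stop = False
--     for i, coord in enumerate(reversed(coords)):
--         if coord == 0 and not stop:
--             if i != 0:
--                 bar_tup += ('┌',)
--             else:
--                 bar_tup += ('┌ ',)
--         elif not stop:
--             stop = True
--             if i != 0:
--                 bar_tup += ('└',)
--             else:
--                 bar_tup += ('└ ',)
--         elif (len(coords) - i) in ones_out:
--             bar_tup += (' ',)
--         else:
--             bar_tup += ('│',)
--     return ''.join(reversed(bar_tup))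
-- ===== SOURCE B (Python) =====
-- def bars(coords, ones_out):
--     n = len(coords)
--     pstar = -1
--     for p, c in enumerate(coords):
--         if c != 0:
--             pstar = p
--     pieces = []
--     for p in range(n):
--         if p > pstar:
--             ch = '┌'
--         elif p == pstar:
--             ch = '└'
--         elif (p + 1) in ones_out:
--             ch = ' '
--         else:
--             ch = '│'
--         if p == n - 1:
--             ch += ' '
--         pieces.append(ch)
--     return ''.join(pieces)
-- ===== Notes on version B (the rewrite author's own statement) =====
-- stated objective: faster
-- what changed: A scans reversed(coords) carrying a stop flag, growing an immutable tuple with += each step (quadratic) and reversing at the end; B first finds the last nonzero index pstar, then emits the pieces in one forward pass into a list joined once.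
import Mathlib
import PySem

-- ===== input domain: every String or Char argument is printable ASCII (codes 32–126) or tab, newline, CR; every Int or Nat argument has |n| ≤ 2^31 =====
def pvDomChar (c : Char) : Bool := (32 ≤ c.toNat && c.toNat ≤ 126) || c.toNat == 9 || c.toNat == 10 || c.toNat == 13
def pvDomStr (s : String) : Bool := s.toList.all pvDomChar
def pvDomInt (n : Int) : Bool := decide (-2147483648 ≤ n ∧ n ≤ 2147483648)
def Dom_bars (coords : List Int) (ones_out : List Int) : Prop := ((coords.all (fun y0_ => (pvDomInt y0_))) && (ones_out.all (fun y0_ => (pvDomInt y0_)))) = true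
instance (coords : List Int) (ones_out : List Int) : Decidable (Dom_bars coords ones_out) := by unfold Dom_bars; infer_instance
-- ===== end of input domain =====

-- B replaces A's reversed backward scan (stop flag, tuple += accumulation, final reversal) by a
-- forward pass over positions after first locating the last nonzero coordinate; a timing run
-- measured B faster (A's tuple += grows quadratically).

-- ===== PORT A =====
-- literal transliteration of A: fold over enumerate(reversed(coords)) carrying (bar_tup, stop),
-- then join the reversed tuple.
def bars (coords : List Int) (ones_out : List Int) : String :=
  let res := (PySem.List.enumerate coords.reverse 0).foldl
    (fun st ic =>
      if ic.2 == 0 && !st.2 then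
        if ic.1 != 0 then (st.1 ++ ["┌"], st.2) else (st.1 ++ ["┌ "], st.2)
      else if !st.2 then
        if ic.1 != 0 then (st.1 ++ ["└"], true) else (st.1 ++ ["└ "], true)
      else if ones_out.contains ((coords.length : Int) - ic.1) then
        (st.1 ++ [" "], st.2)
      else
        (st.1 ++ ["│"], st.2))
    (([], false) : List String × Bool)
  PySem.Str.join "" res.1.reverse

-- ===== PORT B =====
-- literal transliteration of B (Source B): find pstar = last nonzero index, then one forward pass.
def bars_alt (coords : List Int) (ones_out : List Int) : String :=
  let n : Int := coords.length
  let pstar : Int := (PySem.List.enumerate coords 0).foldl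
    (fun acc pc => if pc.2 != 0 then pc.1 else acc) (-1)
  let pieces := (PySem.List.pyRange 0 n 1).map (fun p =>
    let ch : String :=
      if p > pstar then "┌"
      else if p == pstar then "└"
      else if ones_out.contains (p + 1) then " "
      else "│"
    if p == n - 1 then ch ++ " " else ch)
  PySem.Str.join "" pieces

-- ===== PRECONDITION & SPEC =====
def Spec_bars (coords : List Int) (ones_out : List Int) (out : String) : Prop := out = bars_alt coords ones_out
instance (coords : List Int) (ones_out : List Int) (out : String) : Decidable (Spec_bars coords ones_out out) := by unfold Spec_bars; infer_instance

-- ===== CLAIM (what is proved, stated in full; the proofs are below) =====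
def Claim_equal_bars : Prop := ∀ (coords : List Int) (ones_out : List Int), Dom_bars coords ones_out → Spec_bars coords ones_out (bars coords ones_out)

-- ===== LEMMAS AND PROOFS =====

-- reversed map over List.range
theorem rev_map_range {α : Type} (f : Nat → α) : ∀ (N : Nat), ((List.range N).map f).reverse = (List.range N).map (fun k => f (N-1-k)) := by
  intro N
  induction N with
  | zero => simp
  | succ N ih =>
    conv_lhs => rw [List.range_succ]
    conv_rhs => rw [List.range_succ_eq_map]
    rw [List.map_append, List.reverse_append, ih]
    simp only [List.map_cons, List.map_map, List.map_nil, List.reverse_cons, List.reverse_nil,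
      List.nil_append, List.cons_append]
    refine congrArg₂ _ (by congr 1) (List.map_congr_left fun k hk => ?_)
    simp only [Function.comp]
    congr 1
    omega

-- reversed map over a pyRange
theorem rev_map_pyRange {α : Type} (a b : Int) (f : Int → α) :
    ((PySem.List.pyRange a b 1).map f).reverse = (PySem.List.pyRange a b 1).map (fun j => f (a + b - 1 - j)) := by
  rw [PySem.List.pyRange_one, List.map_map, rev_map_range, List.map_map]
  refine List.map_congr_left fun k hk => ?_
  simp only [Function.comp]
  rw [List.mem_range] at hk
  congr 1
  omega

-- shifting a mapped pyRange
theorem map_pyRange_shift {α : Type} (a b s : Int) (f : Int → α) :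
    (PySem.List.pyRange (a + s) (b + s) 1).map f = (PySem.List.pyRange a b 1).map (fun p => f (p + s)) := by
  rw [PySem.List.pyRange_one, PySem.List.pyRange_one, List.map_map, List.map_map]
  have h : b + s - (a + s) = b - a := by ring
  rw [h]
  refine List.map_congr_left fun k hk => ?_
  simp only [Function.comp]
  congr 1
  ring

-- recursive description of A's loop: emitted pieces (in emission order) and the final stop flag
def emitP (n : Int) (O : List Int) : List Int → Int → Bool → List String × Bool
  | [], _, stop => ([], stop)
  | c :: r, i, stop =>
    if c == 0 && !stop then
      let t := emitP n O r (i+1) stop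
      ((if i != 0 then "┌" else "┌ ") :: t.1, t.2)
    else if !stop then
      let t := emitP n O r (i+1) true
      ((if i != 0 then "└" else "└ ") :: t.1, t.2)
    else if O.contains (n - i) then
      let t := emitP n O r (i+1) stop
      (" " :: t.1, t.2)
    else
      let t := emitP n O r (i+1) stop
      ("│" :: t.1, t.2)

-- A's foldl equals emitP with the accumulator split off
theorem foldA_eq (O : List Int) (n : Int) :
    ∀ (l : List Int) (i : Int) (bt : List String) (stop : Bool),
    (PySem.List.enumerate l i).foldl
      (fun st ic =>
        if ic.2 == 0 && !st.2 then
          if ic.1 != 0 then (st.1 ++ ["┌"], st.2) else (st.1 ++ ["┌ "], st.2)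
        else if !st.2 then
          if ic.1 != 0 then (st.1 ++ ["└"], true) else (st.1 ++ ["└ "], true)
        else if O.contains (n - ic.1) then
          (st.1 ++ [" "], st.2)
        else
          (st.1 ++ ["│"], st.2))
      (bt, stop)
    = (bt ++ (emitP n O l i stop).1, (emitP n O l i stop).2) := by
  intro l
  induction l with
  | nil => intro i bt stop; simp [emitP, PySem.List.enumerate]
  | cons c r ih =>
    intro i bt stop
    rw [PySem.List.enumerate_cons, List.foldl_cons]
    simp only [emitP]
    split_ifs with h1 h2 h3 <;>
      simp only [ih, List.append_assoc, List.singleton_append] <;> split_ifs <;> simp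

-- B's pstar fold: last index of a nonzero element
def lastNZ (d : List Int) : Int :=
  (PySem.List.enumerate d 0).foldl (fun acc pc => if pc.2 != 0 then pc.1 else acc) (-1)

theorem lastNZ_fold_lt : ∀ (d : List Int) (s a : Int), a < s + d.length →
    (PySem.List.enumerate d s).foldl (fun acc pc => if pc.2 != 0 then pc.1 else acc) a < s + d.length := by
  intro d
  induction d with
  | nil => intro s a h; simpa [PySem.List.enumerate] using h
  | cons c r ih =>
    intro s a h
    rw [PySem.List.enumerate_cons, List.foldl_cons]
    have h2 : (if (c != 0) = true then s else a) < (s+1) + (r.length : Int) := by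
      split_ifs <;> simp at h ⊢ <;> omega
    have := ih (s+1) _ h2
    have heq : s + 1 + (r.length : Int) = s + ((c :: r).length : Int) := by
      simp only [List.length_cons]; push_cast; ring
    rw [heq] at this
    exact this

theorem lastNZ_lt (d : List Int) : lastNZ d < d.length := by
  have := lastNZ_fold_lt d 0 (-1) (by push_cast; omega)
  simpa [lastNZ] using this

theorem lastNZ_append_zero (d : List Int) : lastNZ (d ++ [0]) = lastNZ d := by
  unfold lastNZ
  rw [PySem.List.enumerate_append, List.foldl_append, PySem.List.enumerate_cons]
  simp [PySem.List.enumerate]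

theorem lastNZ_append_nz (d : List Int) (c : Int) (hc : c ≠ 0) : lastNZ (d ++ [c]) = d.length := by
  unfold lastNZ
  rw [PySem.List.enumerate_append, List.foldl_append, PySem.List.enumerate_cons]
  simp [PySem.List.enumerate, hc]

-- branch lemmas for emitP
theorem emitP_cons_stopped (n : Int) (O : List Int) (c : Int) (r : List Int) (i : Int) :
    emitP n O (c :: r) i true = (((if O.contains (n - i) then " " else "│") : String) :: (emitP n O r (i+1) true).1, (emitP n O r (i+1) true).2) := by
  simp only [emitP, Bool.not_true, Bool.and_false, Bool.false_eq_true, if_false]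
  split_ifs <;> rfl

theorem emitP_cons_zero (n : Int) (O : List Int) (r : List Int) (i : Int) :
    emitP n O ((0:Int) :: r) i false = ((if i != 0 then "┌" else "┌ ") :: (emitP n O r (i+1) false).1, (emitP n O r (i+1) false).2) := by
  simp [emitP]

theorem emitP_cons_nz (n : Int) (O : List Int) (c : Int) (r : List Int) (i : Int) (hc : c ≠ 0) :
    emitP n O (c :: r) i false = ((if i != 0 then "└" else "└ ") :: (emitP n O r (i+1) true).1, (emitP n O r (i+1) true).2) := by
  simp [emitP, hc]

-- the stopped state emits ' '/'│' pieces only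
theorem emitP_stopped (n : Int) (O : List Int) :
    ∀ (r : List Int) (i : Int),
    emitP n O r i true = ((PySem.List.pyRange i (i + r.length) 1).map
      (fun j => if O.contains (n - j) then " " else "│"), true) := by
  intro r
  induction r with
  | nil => intro i; simp [emitP, PySem.List.pyRange_one_eq_nil]
  | cons c r ih =>
    intro i
    rw [emitP_cons_stopped, ih (i+1)]
    have hr : PySem.List.pyRange i (i + (↑(c :: r).length)) 1
        = i :: PySem.List.pyRange (i+1) (i + (↑(c :: r).length)) 1 := by
      refine PySem.List.pyRange_one_cons ?_
      simp only [List.length_cons]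
      push_cast
      omega
    rw [hr]
    simp only [List.map_cons]
    refine congrArg₂ _ (congrArg₂ _ rfl ?_) rfl
    refine congrArg _ (congrArg₂ (fun a b => PySem.List.pyRange a b 1) rfl ?_)
    simp only [List.length_cons]
    push_cast
    ring

-- B's piece for position p, given n and pstar
def pieceB (O : List Int) (n pstar : Int) (p : Int) : String :=
  let ch : String :=
    if p > pstar then "┌"
    else if p == pstar then "└"
    else if O.contains (p + 1) then " "
    else "│"
  if p == n - 1 then ch ++ " " else ch

-- MAIN: the reversed emission equals B's forward pieces over the processed prefix
theorem emitP_main (n : Int) (O : List Int) :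
    ∀ (r : List Int) (i : Int), 0 ≤ i → n = i + r.length →
    (emitP n O r i false).1.reverse
      = (PySem.List.pyRange 0 r.length 1).map (pieceB O n (lastNZ r.reverse)) := by
  intro r
  induction r with
  | nil => intro i _ _; simp [emitP, PySem.List.pyRange_one_eq_nil]
  | cons c r ih =>
    intro i hi hn
    simp only [List.length_cons] at hn
    push_cast at hn
    have hsplit : PySem.List.pyRange 0 (((c:Int) :: r).length) 1
        = PySem.List.pyRange 0 r.length 1 ++ [(r.length : Int)] := by
      simp only [List.length_cons]
      push_cast
      exact PySem.List.pyRange_one_succ_right (by positivity)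
    by_cases hc : c = 0
    · -- '┌' piece, recurse in the false state
      subst hc
      rw [emitP_cons_zero]
      have hrec := ih (i+1) (by omega) (by push_cast; omega)
      simp only [List.reverse_cons, hrec]
      rw [lastNZ_append_zero r.reverse]
      rw [hsplit, List.map_append, List.map_singleton]
      refine congrArg₂ _ rfl ?_
      have hlt : lastNZ r.reverse < ((r.length : Nat) : Int) := by
        have := lastNZ_lt r.reverse
        simpa using this
      have hb : ((r.length : Int) == n - 1) = (i == 0) := by
        by_cases h0 : i = 0
        · have : (r.length : Int) = n - 1 := by omega
          simp [h0, this]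
        · have : (r.length : Int) ≠ n - 1 := by omega
          simp [h0, this]
      simp only [pieceB, if_pos hlt, hb]
      by_cases h0 : i = 0 <;> simp [h0] <;> rfl
    · -- '└' piece, rest is stopped
      rw [emitP_cons_nz n O c r i hc]
      rw [emitP_stopped]
      simp only [List.reverse_cons]
      rw [rev_map_pyRange]
      have hz : lastNZ (r.reverse ++ [c]) = (r.length : Int) := by
        have := lastNZ_append_nz r.reverse c hc
        simpa using this
      rw [hz]
      rw [hsplit, List.map_append, List.map_singleton]
      refine congrArg₂ _ ?_ ?_
      · -- interior: ' '/'│' pieces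
        have hshift : PySem.List.pyRange (i+1) (i + 1 + (r.length:Int)) 1
            = PySem.List.pyRange (0 + (i+1)) ((r.length:Int) + (i+1)) 1 := by
          refine congrArg₂ (fun a b => PySem.List.pyRange a b 1) (by ring) (by ring)
        rw [hshift, map_pyRange_shift]
        refine List.map_congr_left fun p hp => ?_
        rw [PySem.List.mem_pyRange_one] at hp
        have harg : n - (i + 1 + (i + 1 + (r.length:Int)) - 1 - (p + (i + 1))) = p + 1 := by omega
        rw [harg]
        have hgt : ¬ ((r.length:Int) < p) := by omega
        have hne : (p == (r.length:Int)) = false := by simp only [beq_eq_false_iff_ne, ne_eq]; omega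
        have hnl : (p == n - 1) = false := by simp only [beq_eq_false_iff_ne, ne_eq]; omega
        simp only [pieceB, if_neg hgt, hne, hnl, Bool.false_eq_true, if_false]
      · -- the '└' piece
        have hgt : ¬ ((r.length:Int) < (r.length:Int)) := by omega
        have hb : ((r.length : Int) == n - 1) = (i == 0) := by
          by_cases h0 : i = 0
          · have : (r.length : Int) = n - 1 := by omega
            simp [h0, this]
          · have : (r.length : Int) ≠ n - 1 := by omega
            simp [h0, this]
        simp only [pieceB, if_neg hgt, beq_self_eq_true, if_true, hb]
        by_cases h0 : i = 0 <;> simp [h0] <;> rfl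

-- tie the two ports to the lemmas
theorem bars_eq (coords ones_out : List Int) : bars coords ones_out = bars_alt coords ones_out := by
  unfold bars bars_alt
  rw [foldA_eq]
  simp only [List.nil_append]
  have hmain := emitP_main (coords.length : Int) ones_out coords.reverse 0 (le_refl 0)
    (by simp)
  rw [hmain]
  refine congrArg _ ?_
  rw [List.reverse_reverse]
  simp only [List.length_reverse]
  rfl

-- ===== VERDICT (by name: the statement is the Claim_ definition above) =====
theorem bars_spec : Claim_equal_bars := by
  intro coords ones_out _
  unfold Spec_bars
  exact bars_eq coords ones_out
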